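-- pv_equiv track=rewrite | github.com/yejeeni/YeoBaek-Coding-Test-Study | 김민지/27주차/[PGS]기능개발_Lv2.py | solution
-- ===== SOURCE A (Python) =====
-- def solution(progresses, speeds):
--     answer = []
--
--     while progresses:
--         # 하루 진도 증가
--         progresses = [p + s for p, s in zip(progresses, speeds)]
--
--         count = 0
--         # 앞에서부터 100 이상인 기능 세기
--         while progresses and progresses[0] >= 100:
--             progresses.pop(0)
--             speeds.pop(0)
--             count += 1
--
--         if count > 0:
--             answer.append(count)
--
--     return answer
-- ===== SOURCE B (Python) =====
-- def solution(progresses, speeds):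
--     answer = []
--     cur_max = 0
--     for p, s in zip(progresses, speeds):
--         days = max(1, -((p - 100) // s))
--         if answer and days <= cur_max:
--             answer[-1] += 1
--         else:
--             answer.append(1)
--             cur_max = days
--     return answer
-- ===== Notes on version B (the rewrite author's own statement) =====
-- stated objective: faster
-- what changed: B replaces A's day-by-day simulation (re-adding speeds and popping list fronts each day) with a closed-form completion-day ceil((100-p)/s) per feature and a single pass grouping by running maximum; intended as faster — a timing run saw A time out at n=16 where B returned, but could not measure a ratio.
-- outside the precondition, e.g. on solution([150], [0]): A returns [1], B raises ZeroDivisionError; on solution([101, 199], [-1, -1]): A returns [2], B returns [1, 1]; on solution([50], [-1]): A does not finish within the time limit, B returns [1]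
import Mathlib
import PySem

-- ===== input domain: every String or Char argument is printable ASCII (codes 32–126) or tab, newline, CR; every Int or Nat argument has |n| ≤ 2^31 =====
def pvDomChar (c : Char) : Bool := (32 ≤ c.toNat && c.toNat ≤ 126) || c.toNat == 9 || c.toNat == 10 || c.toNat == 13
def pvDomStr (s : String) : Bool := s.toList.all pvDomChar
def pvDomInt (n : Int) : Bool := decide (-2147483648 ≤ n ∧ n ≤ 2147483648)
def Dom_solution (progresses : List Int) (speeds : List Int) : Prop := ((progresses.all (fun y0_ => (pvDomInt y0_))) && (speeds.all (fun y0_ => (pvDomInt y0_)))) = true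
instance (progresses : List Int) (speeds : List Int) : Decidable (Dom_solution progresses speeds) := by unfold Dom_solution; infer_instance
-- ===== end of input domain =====

-- B computes each feature's completion day in closed form and groups by running maximum in one pass,
-- instead of A's day-by-day simulation; note A mutates the caller's `speeds` list in place (pop(0)) —
-- the equivalence proved here is about the return value only.


-- ===== PORT A =====
-- inner `while progresses and progresses[0] >= 100: pop(0) from both lists, count += 1`
def popWhileA : List Int → List Int → Nat × List Int × List Int
  | [], ss => (0, [], ss)
  | p :: ps, ss =>
    if 100 ≤ p then
      let r := popWhileA ps ss.tail
      (r.1 + 1, r.2.1, r.2.2)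
    else (0, p :: ps, ss)

-- outer `while progresses:` loop; under Dom_solution and Pre_solution every feature completes
-- within 2147483748 days (progress ≥ -2^31, speed ≥ 1), so the fuel of 2147483750 is never
-- exhausted: it is only a guard making the recursion total (the recursion stops as soon as the
-- list is empty, as in Python).
def loopA : Nat → List Int → List Int → List Int → List Int
  | 0, _, _, acc => acc
  | fuel + 1, ps, ss, acc =>
    if ps = [] then acc
    else
      let ps' := List.zipWith (· + ·) ps ss      -- progresses = [p + s for p, s in zip(...)]
      let r := popWhileA ps' ss
      let acc' := if 0 < r.1 then acc ++ [(r.1 : Int)] else acc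
      loopA fuel r.2.1 r.2.2 acc'

def solution (progresses : List Int) (speeds : List Int) : List Int :=
  loopA 2147483750 progresses speeds []

-- ===== PORT B =====
-- days = max(1, -((p - 100) // s))
def daysNeeded (p s : Int) : Int := max 1 (-(PySem.Int.floordiv (p - 100) s))

-- the for-loop state: (answer built in reverse so `answer[-1] += 1` is a head update, cur_max)
def stepB (st : List Int × Int) (x : Int × Int) : List Int × Int :=
  let d := daysNeeded x.1 x.2
  match st.1 with
  | c :: rest => if d ≤ st.2 then ((c + 1) :: rest, st.2) else (1 :: c :: rest, d)
  | [] => ([1], d)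

def solution_alt (progresses : List Int) (speeds : List Int) : List Int :=
  ((progresses.zip speeds).foldl stepB ([], 0)).1.reverse

-- ===== PRECONDITION & SPEC =====
-- Pre_ restricts to the task's natural domain of positive speeds: on inputs where some paired
-- speed is ≤ 0 A usually never terminates, and B's closed form itself raises ZeroDivisionError
-- when that speed is 0 (on the few such inputs where A still returns because every feature is
-- already within one day of completion, B raises or returns its closed-form grouping — see the
-- cited examples).
def Pre_solution (progresses : List Int) (speeds : List Int) : Prop :=
  ∀ x ∈ progresses.zip speeds, 1 ≤ x.2
instance (progresses : List Int) (speeds : List Int) : Decidable (Pre_solution progresses speeds) := by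
  unfold Pre_solution; infer_instance

def pvWitness_solution : List Int × List Int := ([93, 30, 55], [1, 30, 5])

def Spec_solution (progresses : List Int) (speeds : List Int) (out : List Int) : Prop := out = solution_alt progresses speeds
instance (progresses : List Int) (speeds : List Int) (out : List Int) : Decidable (Spec_solution progresses speeds out) := by unfold Spec_solution; infer_instance

-- ===== CLAIM (what is proved, stated in full; the proofs are below) =====
def Claim_equal_solution : Prop := ∀ (progresses : List Int) (speeds : List Int), Dom_solution progresses speeds → Pre_solution progresses speeds → Spec_solution progresses speeds (solution progresses speeds)

-- ===== LEMMAS AND PROOFS =====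

-- spec-level grouping of completion days: group size = leader plus following days ≤ leader's day
def groupsD : List Int → List Int
  | [] => []
  | d :: t => (((t.takeWhile (fun x => x ≤ d)).length : Int) + 1) :: groupsD (t.dropWhile (fun x => x ≤ d))
termination_by ds => ds.length
decreasing_by
  have := List.length_dropWhile_le (fun x => decide (x ≤ d)) t
  simp at *; omega

def Dfun (x : Int × Int) : Int := daysNeeded x.1 x.2

def qv (p s : Int) : Int := -(PySem.Int.floordiv (p - 100) s)

lemma daysNeeded_eq (p s : Int) : daysNeeded p s = max 1 (qv p s) := rfl

lemma qv_bracket (p s : Int) (hs : 1 ≤ s) :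
    (qv p s - 1) * s < 100 - p ∧ 100 - p ≤ qv p s * s := by
  apply (PySem.Int.neg_floordiv_neg_eq_iff_of_pos (a := 100 - p) (b := s) (q := qv p s)
    (by omega)).mp
  have h : -(100 - p) = p - 100 := by ring
  rw [qv, h]

lemma one_le_days (p s : Int) : 1 ≤ daysNeeded p s := le_max_left _ _

lemma one_le_Dfun (x : Int × Int) : 1 ≤ Dfun x := one_le_days _ _

lemma days_le_one_iff (p s : Int) (hs : 1 ≤ s) : daysNeeded p s ≤ 1 ↔ 100 ≤ p + s := by
  obtain ⟨h1, h2⟩ := qv_bracket p s hs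
  rw [daysNeeded_eq]
  constructor
  · intro h
    have hq : qv p s ≤ 1 := by omega
    nlinarith
  · intro h
    have hq : qv p s ≤ 1 := by nlinarith
    omega

lemma days_shift (p s : Int) (hs : 1 ≤ s) :
    daysNeeded (p + s) s = max 1 (daysNeeded p s - 1) := by
  have h0 : (0 : Int) < s := by omega
  have e : qv (p + s) s = qv p s - 1 := by
    unfold qv
    rw [PySem.Int.floordiv_eq_ediv_of_pos h0, PySem.Int.floordiv_eq_ediv_of_pos h0]
    have h1 : p + s - 100 = (p - 100) + 1 * s := by ring
    rw [h1, Int.add_mul_ediv_right _ _ (by omega : s ≠ 0)]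
    ring
  rw [daysNeeded_eq, daysNeeded_eq, e]
  omega

lemma days_le_bound (p s : Int) (hp : -2147483648 ≤ p) (hs : 1 ≤ s) :
    daysNeeded p s ≤ 2147483748 := by
  obtain ⟨h1, h2⟩ := qv_bracket p s hs
  have : qv p s ≤ 2147483748 := by nlinarith
  rw [daysNeeded_eq]; omega

-- list plumbing -----------------------------------------------------------

lemma loopA_nil : ∀ (f : Nat) (ss acc : List Int), loopA f [] ss acc = acc
  | 0, _, _ => rfl
  | _ + 1, _, _ => by simp [loopA]

lemma popWhileA_eq : ∀ (ps ss : List Int), popWhileA ps ss =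
    ((ps.takeWhile (fun p => 100 ≤ p)).length,
     ps.dropWhile (fun p => 100 ≤ p),
     ss.drop (ps.takeWhile (fun p => 100 ≤ p)).length)
  | [], ss => by simp [popWhileA]
  | p :: ps, ss => by
    by_cases h : (100 : Int) ≤ p
    · simp only [popWhileA, h, if_pos, popWhileA_eq ps ss.tail,
        List.takeWhile_cons, List.dropWhile_cons, decide_eq_true h]
      simp [← List.drop_one, List.drop_drop, Nat.add_comm]
    · simp [popWhileA, h, List.takeWhile_cons, List.dropWhile_cons]

lemma zipWith_add_eq_map : ∀ (ps ss : List Int),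
    List.zipWith (· + ·) ps ss = (ps.zip ss).map (fun x => x.1 + x.2)
  | [], _ => by simp
  | _ :: _, [] => by simp
  | p :: pt, s :: st => by simp [zipWith_add_eq_map pt st]

lemma zip_zipWith : ∀ (ps ss : List Int),
    (List.zipWith (· + ·) ps ss).zip ss = (ps.zip ss).map (fun x => (x.1 + x.2, x.2))
  | [], _ => by simp
  | _ :: _, [] => by simp
  | p :: pt, s :: st => by simp [zip_zipWith pt st]

lemma drop_zip (l m : List Int) (k : Nat) : (l.zip m).drop k = (l.drop k).zip (m.drop k) := by
  induction l generalizing m k with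
  | nil => simp
  | cons a t ih =>
    cases m with
    | nil => simp
    | cons b s =>
      cases k with
      | zero => simp
      | succ k => simpa using ih s k

lemma dropWhile_eq_drop {α : Type} (p : α → Bool) :
    ∀ (l : List α), l.dropWhile p = l.drop (l.takeWhile p).length
  | [] => rfl
  | a :: t => by
    by_cases h : p a = true
    · simp [List.dropWhile_cons, List.takeWhile_cons, h, dropWhile_eq_drop p t]
    · simp [List.dropWhile_cons, List.takeWhile_cons, h]

lemma tdWhile_congr {α : Type} (p q : α → Bool) :
    ∀ (l : List α), (∀ x ∈ l, p x = q x) →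
      l.takeWhile p = l.takeWhile q ∧ l.dropWhile p = l.dropWhile q
  | [], _ => ⟨rfl, rfl⟩
  | a :: t, h => by
    have ha := h a (by simp)
    have ih := tdWhile_congr p q t (fun x hx => h x (by simp [hx]))
    rw [List.takeWhile_cons, List.dropWhile_cons, List.takeWhile_cons, List.dropWhile_cons, ha]
    cases q a <;> simp [ih.1, ih.2]

-- shifting every day by one (given the leader needs ≥ 2 days) does not change the grouping
lemma groupsD_shift (ds : List Int) :
    (∀ d ∈ ds, 1 ≤ d) → (∀ h : ds ≠ [], 2 ≤ ds.head h) →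
    groupsD (ds.map (fun d => max 1 (d - 1))) = groupsD ds := by
  induction ds using groupsD.induct with
  | case1 => simp [groupsD]
  | case2 d t ih =>
    intro hall hhead
    have hd : 2 ≤ d := hhead (by simp)
    have hmax : max 1 (d - 1) = d - 1 := by omega
    have hcongr : ∀ x ∈ t,
        ((fun y => decide (y ≤ d - 1)) ∘ (fun y => max 1 (y - 1))) x = decide (x ≤ d) := by
      intro x hx
      have := hall x (by simp [hx])
      simp only [Function.comp]
      exact decide_eq_decide.mpr (by omega)
    have htw := (tdWhile_congr _ _ t hcongr).1
    have hdw := (tdWhile_congr _ _ t hcongr).2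
    have hih : groupsD ((t.dropWhile (fun x => x ≤ d)).map (fun y => max 1 (y - 1)))
        = groupsD (t.dropWhile (fun x => x ≤ d)) := by
      apply ih
      · intro x hx; exact hall x (by simp [(List.dropWhile_sublist _).mem hx])
      · intro hne
        have hhd := List.head_dropWhile_not (fun x => decide (x ≤ d)) hne
        have hmem : (t.dropWhile (fun x => x ≤ d)).head hne ∈ t :=
          (List.dropWhile_sublist _).mem (List.head_mem hne)
        have := hall _ (List.mem_cons_of_mem d hmem)
        simp at hhd
        omega
    simp only [List.map_cons, hmax, groupsD, List.takeWhile_map, List.dropWhile_map, htw, hdw,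
      List.length_map]
    rw [hih]

-- A's loop computes the grouping of the completion days of the zipped pairs
lemma loopA_spec : ∀ (fuel : Nat) (n : Int) (ps ss acc : List Int),
    (∀ x ∈ ps.zip ss, 1 ≤ x.2 ∧ Dfun x ≤ n) → n < (fuel : Int) →
    loopA fuel ps ss acc = acc ++ groupsD ((ps.zip ss).map Dfun) := by
  intro fuel
  induction fuel with
  | zero =>
    intro n ps ss acc hall hn
    cases hz : ps.zip ss with
    | nil => simp [loopA, groupsD]
    | cons x t =>
      exfalso
      have h1 := (hall x (by rw [hz]; exact List.mem_cons_self)).2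
      have h2 := one_le_Dfun x
      simp at hn
      omega
  | succ f ih =>
    intro n ps ss acc hall hn
    match ps, ss with
    | [], ss => simp [loopA, groupsD]
    | p :: pt, [] =>
      simp only [loopA, if_neg (by simp : ¬ (p :: pt = []))]
      simp [popWhileA, loopA_nil, groupsD]
    | p :: pt, s :: st =>
      have hps := hall (p, s) (by simp)
      by_cases hc : 100 ≤ p + s
      -- ===== the leading feature finishes today (its day count is 1) =====
      · have hd1 : daysNeeded p s = 1 := by
          have h1 := one_le_days p s
          have h2 := (days_le_one_iff p s hps.1).mpr hc
          omega
        have hzc : (p :: pt).zip (s :: st) = (p, s) :: pt.zip st := by simp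
        have hmemT : ∀ y ∈ pt.zip st, y ∈ (p :: pt).zip (s :: st) := by
          intro y hy; rw [hzc]; exact List.mem_cons_of_mem _ hy
        have hcongr : ∀ y ∈ pt.zip st,
            ((fun d => decide (d ≤ (1 : Int))) ∘ Dfun) y = decide (100 ≤ y.1 + y.2) := by
          intro y hy
          simp only [Function.comp, Dfun]
          exact decide_eq_decide.mpr (days_le_one_iff y.1 y.2 (hall y (hmemT y hy)).1)
        have htk : ((pt.zip st).map Dfun).takeWhile (fun d => d ≤ 1)
            = ((pt.zip st).takeWhile (fun y => decide (100 ≤ y.1 + y.2))).map Dfun := by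
          rw [List.takeWhile_map, (tdWhile_congr _ _ _ hcongr).1]
        have hdk : ((pt.zip st).map Dfun).dropWhile (fun d => d ≤ 1)
            = ((pt.zip st).dropWhile (fun y => decide (100 ≤ y.1 + y.2))).map Dfun := by
          rw [List.dropWhile_map, (tdWhile_congr _ _ _ hcongr).2]
        set k := ((pt.zip st).takeWhile (fun y => decide (100 ≤ y.1 + y.2))).length with hkdef
        have hdropT : (pt.zip st).dropWhile (fun y => decide (100 ≤ y.1 + y.2))
            = (pt.zip st).drop k := by rw [hkdef, dropWhile_eq_drop]
        -- one iteration of the loop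
        have htwmap : (List.zipWith (· + ·) pt st).takeWhile (fun v => decide (100 ≤ v))
            = ((pt.zip st).takeWhile (fun y => decide (100 ≤ y.1 + y.2))).map
                (fun x => x.1 + x.2) := by
          rw [zipWith_add_eq_map, List.takeWhile_map]
          rfl
        have hdwmap : (List.zipWith (· + ·) pt st).dropWhile (fun v => decide (100 ≤ v))
            = ((pt.zip st).dropWhile (fun y => decide (100 ≤ y.1 + y.2))).map
                (fun x => x.1 + x.2) := by
          rw [zipWith_add_eq_map, List.dropWhile_map]
          rfl
        have hstep : loopA (f + 1) (p :: pt) (s :: st) acc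
            = loopA f (((pt.zip st).drop k).map (fun x => x.1 + x.2)) (st.drop k)
                (acc ++ [((k + 1 : Nat) : Int)]) := by
          simp only [loopA, if_neg (by simp : ¬ (p :: pt = []))]
          rw [show List.zipWith (· + ·) (p :: pt) (s :: st)
              = (p + s) :: List.zipWith (· + ·) pt st from rfl, popWhileA_eq]
          simp [List.takeWhile_cons, List.dropWhile_cons, hc, htwmap, hdwmap, hdropT,
            List.map_drop, ← hkdef, Nat.add_comm 1 k, List.drop_succ_cons]
        rw [hstep]
        -- the right-hand side: the first group has k + 1 features
        rw [hzc, List.map_cons, show Dfun (p, s) = 1 from hd1]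
        rw [show groupsD ((1 : Int) :: (pt.zip st).map Dfun)
            = (((((pt.zip st).map Dfun).takeWhile (fun x => x ≤ (1 : Int))).length : Int) + 1)
              :: groupsD (((pt.zip st).map Dfun).dropWhile (fun x => x ≤ (1 : Int)))
          from by simp [groupsD]]
        rw [htk, hdk, hdropT, List.length_map]
        rcases hrest : (pt.zip st).drop k with _ | ⟨y0, trest⟩
        · -- nothing left after this group
          simp [loopA_nil, groupsD]
          exact hkdef
        · -- more groups follow; the next leader needs ≥ 2 days
          rw [← hrest]
          have hy0mem : y0 ∈ pt.zip st :=
            List.mem_of_mem_drop (i := k) (by rw [hrest]; exact List.mem_cons_self)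
          have hy0 : 1 < Dfun y0 := by
            have hne : (pt.zip st).dropWhile (fun y : Int × Int => decide (100 ≤ y.1 + y.2)) ≠ [] := by
              rw [hdropT, hrest]; simp
            have hhd := List.head_dropWhile_not (fun y : Int × Int => decide (100 ≤ y.1 + y.2)) hne
            have hhead : ((pt.zip st).dropWhile
                (fun y : Int × Int => decide (100 ≤ y.1 + y.2))).head hne = y0 := by
              simp [hdropT, hrest]
            rw [hhead] at hhd
            have h1s := (hall y0 (hmemT y0 hy0mem)).1
            have hiff := days_le_one_iff y0.1 y0.2 h1s
            have h1d := one_le_days y0.1 y0.2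
            simp at hhd
            simp only [Dfun]
            omega
          have hn2 : 2 ≤ n := by
            have := (hall y0 (hmemT y0 hy0mem)).2
            omega
          -- rewrite the recursion state as the aged remaining pair list
          have hreczip : ((((pt.zip st).drop k).map (fun x => x.1 + x.2)).zip (st.drop k))
              = ((pt.zip st).drop k).map (fun x => (x.1 + x.2, x.2)) := by
            rw [drop_zip, ← zipWith_add_eq_map, zip_zipWith, ← drop_zip]
          rw [ih (n - 1) _ _ _ ?memcond (by push_cast at hn ⊢; omega)]
          case memcond =>
            intro x hx
            rw [hreczip] at hx
            obtain ⟨y, hy, rfl⟩ := List.mem_map.mp hx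
            have hyc := hall y (hmemT y (List.mem_of_mem_drop hy))
            refine ⟨hyc.1, ?_⟩
            have := days_shift y.1 y.2 hyc.1
            simp only [Dfun] at this hyc ⊢
            omega
          rw [hreczip]
          have hmap : (((pt.zip st).drop k).map (fun x => (x.1 + x.2, x.2))).map Dfun
              = (((pt.zip st).drop k).map Dfun).map (fun d => max 1 (d - 1)) := by
            rw [List.map_map, List.map_map]
            apply List.map_congr_left
            intro y hy
            have := days_shift y.1 y.2 (hall y (hmemT y (List.mem_of_mem_drop hy))).1
            simpa [Dfun, Function.comp] using this
          rw [hmap, groupsD_shift]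
          · simp [groupsD]
            exact hkdef
          · intro d hd
            obtain ⟨y, hy, rfl⟩ := List.mem_map.mp hd
            exact one_le_Dfun y
          · intro hne
            simp only [hrest, List.map_cons, List.head_cons]
            omega
      -- ===== nobody finishes today: just age every feature by one day =====
      · have hd2 : 2 ≤ daysNeeded p s := by
          have h1 := one_le_days p s
          have h2 := days_le_one_iff p s hps.1
          omega
        have hstep : loopA (f + 1) (p :: pt) (s :: st) acc
            = loopA f (List.zipWith (· + ·) (p :: pt) (s :: st)) (s :: st) acc := by
          simp only [loopA, if_neg (by simp : ¬ (p :: pt = []))]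
          rw [show List.zipWith (· + ·) (p :: pt) (s :: st)
              = (p + s) :: List.zipWith (· + ·) pt st from rfl, popWhileA_eq]
          simp [List.takeWhile_cons, List.dropWhile_cons, hc]
        rw [hstep]
        rw [ih (n - 1) _ _ acc ?cond (by push_cast at hn ⊢; omega)]
        case cond =>
          intro x hx
          rw [zip_zipWith] at hx
          obtain ⟨y, hy, rfl⟩ := List.mem_map.mp hx
          have hyc := hall y hy
          refine ⟨hyc.1, ?_⟩
          have hsh := days_shift y.1 y.2 hyc.1
          have hn2 : 2 ≤ n := le_trans (show (2 : Int) ≤ Dfun (p, s) from hd2)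
            (hall (p, s) (by simp)).2
          simp only [Dfun] at hsh hyc ⊢
          omega
        rw [zip_zipWith]
        have hmap : ((((p :: pt).zip (s :: st)).map (fun x => (x.1 + x.2, x.2))).map Dfun)
            = (((p :: pt).zip (s :: st)).map Dfun).map (fun d => max 1 (d - 1)) := by
          rw [List.map_map, List.map_map]
          apply List.map_congr_left
          intro y hy
          have := days_shift y.1 y.2 (hall y hy).1
          simpa [Dfun, Function.comp] using this
        rw [hmap, groupsD_shift]
        · intro d hd
          obtain ⟨y, hy, rfl⟩ := List.mem_map.mp hd
          exact one_le_Dfun y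
        · intro hne
          simp only [List.zip_cons_cons, List.map_cons, List.head_cons]
          simpa [Dfun] using hd2

-- B's fold resumed mid-group (current group already holds c features, leader day cur)
lemma foldB_spec : ∀ (L : List (Int × Int)) (c : Int) (rest : List Int) (cur : Int),
    ((L.foldl stepB (c :: rest, cur)).1).reverse
      = rest.reverse ++ (c + ((L.map Dfun).takeWhile (fun x => x ≤ cur)).length) ::
          groupsD ((L.map Dfun).dropWhile (fun x => x ≤ cur)) := by
  intro L
  induction L with
  | nil => simp [groupsD]
  | cons x t ih =>
    intro c rest cur
    rw [List.foldl_cons]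
    by_cases h : daysNeeded x.1 x.2 ≤ cur
    · have hs : stepB (c :: rest, cur) x = ((c + 1) :: rest, cur) := by
        simp [stepB, h]
      rw [hs, ih]
      simp [Dfun, h]
      ring
    · have hs : stepB (c :: rest, cur) x = (1 :: c :: rest, daysNeeded x.1 x.2) := by
        simp [stepB, h]
      rw [hs, ih]
      simp [Dfun, h, groupsD]
      ring_nf

lemma alt_eq_groups (ps ss : List Int) :
    solution_alt ps ss = groupsD ((ps.zip ss).map Dfun) := by
  unfold solution_alt
  cases hz : ps.zip ss with
  | nil => simp [groupsD]
  | cons x t =>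
    rw [List.foldl_cons]
    have hs : stepB ([], 0) x = ([1], daysNeeded x.1 x.2) := by simp [stepB]
    rw [hs, foldB_spec t 1 [] (daysNeeded x.1 x.2)]
    simp [groupsD, Dfun]
    ring

-- ===== VERDICT (by name: the statement is the Claim_ definition above) =====
theorem solution_spec : Claim_equal_solution := by
  intro ps ss hdom hpre
  unfold Spec_solution
  rw [alt_eq_groups, solution]
  have h := loopA_spec 2147483750 2147483748 ps ss [] ?_ (by norm_num)
  · simpa using h
  · intro x hx
    have hmem := List.of_mem_zip hx
    have hp : pvDomInt x.1 = true := by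
      unfold Dom_solution at hdom
      simp only [Bool.and_eq_true, List.all_eq_true] at hdom
      exact hdom.1 x.1 hmem.1
    have hpb : -2147483648 ≤ x.1 := by
      unfold pvDomInt at hp
      simp at hp
      exact hp.1
    exact ⟨hpre x hx, days_le_bound x.1 x.2 hpb (hpre x hx)⟩
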